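-- pv_equiv track=rewrite | github.com/silver-phoenix-ideas/pmc-company-website | modules/components.py | get_column_sizes
-- ===== SOURCE A (Python) =====
-- def get_column_sizes(data_count, column_count):
--     quotient = data_count // column_count
--     remainder = data_count % column_count
--     columns = [quotient] * column_count
--
--     if remainder:
--         for index, column in enumerate(columns):
--             if remainder:
--                 columns[index] += 1
--                 remainder -= 1
--
--     return columns
-- ===== SOURCE B (Python) =====
-- def get_column_sizes(data_count, column_count):
--     quotient, remainder = divmod(data_count, column_count)
--     return [quotient + 1] * remainder + [quotient] * (column_count - remainder)
-- ===== Notes on version B (the rewrite author's own statement) =====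
-- stated objective: simpler
-- what changed: Replaces A's enumerate-and-decrement mutation loop with a loop-free closed form: concatenate remainder copies of quotient+1 with column_count-remainder copies of quotient (no per-element branch, just list replication).
import Mathlib
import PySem

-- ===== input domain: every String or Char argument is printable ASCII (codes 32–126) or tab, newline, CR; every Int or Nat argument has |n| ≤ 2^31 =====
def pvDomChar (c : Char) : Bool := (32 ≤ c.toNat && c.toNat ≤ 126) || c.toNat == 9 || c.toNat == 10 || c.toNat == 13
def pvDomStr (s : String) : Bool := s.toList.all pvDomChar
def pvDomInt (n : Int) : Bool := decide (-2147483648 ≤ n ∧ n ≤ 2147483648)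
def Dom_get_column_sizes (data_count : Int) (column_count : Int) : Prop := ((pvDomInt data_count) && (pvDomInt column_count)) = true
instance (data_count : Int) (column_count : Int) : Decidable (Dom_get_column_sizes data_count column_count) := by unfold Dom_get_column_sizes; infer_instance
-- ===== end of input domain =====

-- B replaces A's enumerate-and-decrement loop with a loop-free closed form (remainder copies of quotient+1 ++ the rest quotient); objective: simpler.


-- ===== PORT A =====
-- Literal port of A: quotient/remainder, a list of column_count copies of quotient,
-- then (if remainder is truthy) a loop over enumerate(columns) bumping columns[index]
-- and decrementing remainder while it is truthy.  The enumerate index is always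
-- nonnegative, so `.toNat` on it is exact.
def get_column_sizes (data_count : Int) (column_count : Int) : List Int :=
  let quotient := PySem.Int.floordiv data_count column_count
  let remainder := PySem.Int.mod data_count column_count
  let columns := List.replicate column_count.toNat quotient
  if remainder ≠ 0 then
    (((PySem.List.enumerate columns).foldl
        (fun (st : List Int × Int) ic =>
          if st.2 ≠ 0 then
            (st.1.set ic.1.toNat (st.1.getD ic.1.toNat 0 + 1), st.2 - 1)
          else st)
        (columns, remainder))).1
  else columns

-- ===== PORT B =====
def get_column_sizes_alt (data_count : Int) (column_count : Int) : List Int :=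
  let quotient := PySem.Int.floordiv data_count column_count
  let remainder := PySem.Int.mod data_count column_count
  List.replicate remainder.toNat (quotient + 1) ++
    List.replicate (column_count - remainder).toNat quotient

-- ===== PRECONDITION & SPEC =====
-- Pre_ excludes column_count = 0, where Python A raises ZeroDivisionError (B raises too).
def Pre_get_column_sizes (data_count : Int) (column_count : Int) : Prop := column_count ≠ 0
instance (data_count : Int) (column_count : Int) : Decidable (Pre_get_column_sizes data_count column_count) := by unfold Pre_get_column_sizes; infer_instance
def pvWitness_get_column_sizes : Int × Int := (7, 3)

def Spec_get_column_sizes (data_count : Int) (column_count : Int) (out : List Int) : Prop := out = get_column_sizes_alt data_count column_count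
instance (data_count : Int) (column_count : Int) (out : List Int) : Decidable (Spec_get_column_sizes data_count column_count out) := by unfold Spec_get_column_sizes; infer_instance

-- ===== CLAIM (what is proved, stated in full; the proofs are below) =====
def Claim_equal_get_column_sizes : Prop := ∀ (data_count : Int) (column_count : Int), Dom_get_column_sizes data_count column_count → Pre_get_column_sizes data_count column_count → Spec_get_column_sizes data_count column_count (get_column_sizes data_count column_count)

-- ===== LEMMAS AND PROOFS =====

-- "bump the first k entries by one", the shape of A's loop result
def pvBump (l : List Int) (k : Nat) : List Int :=
  l.mapIdx (fun i x => if i < k then x + 1 else x)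

lemma pvBump_length (l : List Int) (k : Nat) : (pvBump l k).length = l.length := by
  simp [pvBump]

lemma pvBump_zero (l : List Int) : pvBump l 0 = l := by
  apply List.ext_getElem
  · simp [pvBump_length]
  · intro i hi _
    simp [pvBump]

-- invariant of A's loop over range-like indices
lemma pvFold_range (l : List Int) (r : Int) (hr : 0 ≤ r) (n : Nat) :
    ((List.range n).foldl
        (fun (st : List Int × Int) (i : Nat) =>
          if st.2 ≠ 0 then (st.1.set i (st.1.getD i 0 + 1), st.2 - 1) else st)
        (l, r))
      = (pvBump l (min n r.toNat), r - min n r.toNat) := by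
  induction n with
  | zero => simp [pvBump_zero]
  | succ n ih =>
    rw [List.range_succ, List.foldl_append, ih]
    simp only [List.foldl_cons, List.foldl_nil]
    by_cases h : n < r.toNat
    · have h1 : r - (min n r.toNat : Nat) ≠ 0 := by omega
      have hmin : min n r.toNat = n := by omega
      have hmin' : min (n+1) r.toNat = n + 1 := by omega
      rw [if_pos h1, hmin, hmin', Prod.mk.injEq]
      constructor
      · by_cases hn : n < l.length
        · apply List.ext_getElem
          · simp [pvBump_length]
          · intro i hi _
            have hi' : i < l.length := by simpa [pvBump_length] using hi
            rw [List.getElem_set]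
            by_cases hin : n = i
            · subst hin
              have : (pvBump l n).getD n 0 = l[n] := by
                rw [List.getD_eq_getElem?_getD]
                simp [pvBump, hn]
              simp [pvBump, hn]
            · simp only [if_neg hin]
              simp only [pvBump, List.getElem_mapIdx]
              split_ifs <;> omega
        · have hset : ∀ v, (pvBump l n).set n v = pvBump l n := by
            intro v
            apply List.set_eq_of_length_le
            rw [pvBump_length]
            omega
          have : pvBump l (n+1) = pvBump l n := by
            apply List.ext_getElem
            · simp [pvBump_length]
            · intro i hi _
              have : i < l.length := by simpa [pvBump_length] using hi
              simp only [pvBump, List.getElem_mapIdx]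
              split_ifs <;> omega
          rw [hset, this]
      · push_cast
        ring
    · have hmin : min n r.toNat = r.toNat := by omega
      have hmin' : min (n+1) r.toNat = r.toNat := by omega
      have h0 : r - (r.toNat : Int) = 0 := by omega
      rw [hmin, hmin', h0]
      simp

-- A's fold ignores the paired element, so folding enumerate = folding range
lemma pvFold_enumerate (l cols : List Int) (r : Int) (s : Nat) :
    (PySem.List.enumerate l (s : Int)).foldl
        (fun (st : List Int × Int) (ic : Int × Int) =>
          if st.2 ≠ 0 then
            (st.1.set ic.1.toNat (st.1.getD ic.1.toNat 0 + 1), st.2 - 1)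
          else st)
        (cols, r)
      = (List.range' s l.length).foldl
          (fun (st : List Int × Int) (i : Nat) =>
            if st.2 ≠ 0 then (st.1.set i (st.1.getD i 0 + 1), st.2 - 1) else st)
          (cols, r) := by
  induction l generalizing cols r s with
  | nil => simp [PySem.List.enumerate]
  | cons x xs ih =>
    rw [PySem.List.enumerate_cons, List.length_cons, List.range'_succ]
    simp only [List.foldl_cons]
    have hcast : ((s : Int) + 1) = ((s + 1 : Nat) : Int) := by push_cast; ring
    have htn : ((s : Int)).toNat = s := by omega
    rw [htn, hcast, ih]

lemma pvBump_replicate (q : Int) (n k : Nat) (hk : k ≤ n) :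
    pvBump (List.replicate n q) k =
      List.replicate k (q + 1) ++ List.replicate (n - k) q := by
  apply List.ext_getElem
  · simp [pvBump_length]; omega
  · intro i hi hi'
    have hn : i < n := by simpa [pvBump_length] using hi
    simp only [pvBump, List.getElem_mapIdx, List.getElem_replicate]
    by_cases h : i < k
    · rw [if_pos h, List.getElem_append_left (by simpa using h)]
      simp
    · rw [if_neg h, List.getElem_append_right (by simpa using h)]
      simp

-- ===== VERDICT (by name: the statement is the Claim_ definition above) =====
theorem get_column_sizes_spec : Claim_equal_get_column_sizes := by
  intro d c _ hc
  unfold Spec_get_column_sizes get_column_sizes get_column_sizes_alt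
  by_cases hcpos : 0 < c
  · have hr0 : 0 ≤ PySem.Int.mod d c := PySem.Int.mod_nonneg d hcpos
    have hrc : PySem.Int.mod d c < c := PySem.Int.mod_lt d hcpos
    obtain ⟨r, hrdef⟩ : ∃ r, PySem.Int.mod d c = r := ⟨_, rfl⟩
    obtain ⟨q, hqdef⟩ : ∃ q, PySem.Int.floordiv d c = q := ⟨_, rfl⟩
    rw [hrdef] at hr0 hrc
    simp only [hrdef, hqdef]
    by_cases hrz : r = 0
    · subst hrz
      simp only [ne_eq, not_true_eq_false, if_false]
      simp only [Int.toNat_zero, List.replicate_zero, List.nil_append, sub_zero]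
    · rw [if_pos hrz]
      have hE := pvFold_enumerate (List.replicate c.toNat q) (List.replicate c.toNat q) r 0
      simp only [Nat.cast_zero] at hE
      rw [hE]
      have hlen : List.range' 0 (List.replicate c.toNat q).length
          = List.range (List.replicate c.toNat q).length := by
        simp [List.range_eq_range']
      rw [hlen, List.length_replicate, pvFold_range _ _ hr0]
      have hle : r.toNat ≤ c.toNat := by omega
      have hmin : min c.toNat r.toNat = r.toNat := by omega
      have h4 : (c - r).toNat = c.toNat - r.toNat := by omega
      rw [hmin, pvBump_replicate q c.toNat r.toNat hle, h4]
  · have hcneg : c < 0 := by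
      rcases lt_trichotomy c 0 with h | h | h
      · exact h
      · exact absurd h hc
      · exact absurd h hcpos
    have hb := PySem.Int.mod_neg_bounds d hcneg
    obtain ⟨r, hrdef⟩ : ∃ r, PySem.Int.mod d c = r := ⟨_, rfl⟩
    rw [hrdef] at hb
    simp only [hrdef]
    have h1 : c.toNat = 0 := by omega
    have h2 : r.toNat = 0 := by omega
    have h3 : (c - r).toNat = 0 := by omega
    by_cases hrz : r = 0
    · simp [hrz, h1]
    · rw [if_pos hrz]
      simp [h1, h2, h3]
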